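-- pv_equiv track=rewrite | github.com/StarSein/BaekJoon | 백준/Gold/23327. 리그전 오브 레전드/리그전 오브 레전드.py | solution
-- ===== SOURCE A (Python) =====
-- from typing import List, Tuple
--
-- def solution(N: int, Q: int, a_list: List[int], div_list: List[Tuple[int, int]]) -> List[int]:
--     pfs = [0]
--     for ai in a_list:
--         pfs.append(pfs[-1] + ai)
--     # pfs[i]: i번째 원소까지의 누적합 (prefix_sums)
--     ppfs = [0]
--     for ai in a_list:
--         ppfs.append(ppfs[-1] + ai ** 2)
--     # ppfs[i]: 각 원소를 제곱했을 때, i번째 원소까지의 누적합 (powered_prefix_sums)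
--
--     answers = []
--     for l, r in div_list:
--         interval_sum = pfs[r] - pfs[l - 1]
--         powered_interval_sum = ppfs[r] - ppfs[l - 1]
--         answer = (interval_sum ** 2 - powered_interval_sum) // 2
--         answers.append(answer)
--     return answers
-- ===== SOURCE B (Python) =====
-- def solution(N, Q, a_list, div_list):
--     # One pass over a_list building pfs and D where D[k] = D[k-1] + a_k * pfs[k-1];
--     # each answer is a direct difference, no squaring and no // division.
--     pfs = [0]
--     D = [0]
--     for ai in a_list:
--         D.append(D[-1] + ai * pfs[-1])
--         pfs.append(pfs[-1] + ai)
--     return [(D[r] - D[l - 1]) - pfs[l - 1] * (pfs[r] - pfs[l - 1])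
--             for l, r in div_list]
-- ===== Notes on version B (the rewrite author's own statement) =====
-- stated objective: alternative
-- what changed: Replaces the prefix-of-squares table and the (sum^2 - sumsq)//2 query formula by a single-pass table D[k] = D[k-1] + a_k*pfs[k-1], answering each query as the direct integer difference (D[r]-D[l-1]) - pfs[l-1]*(pfs[r]-pfs[l-1]), with no squaring and no division.
import Mathlib
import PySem

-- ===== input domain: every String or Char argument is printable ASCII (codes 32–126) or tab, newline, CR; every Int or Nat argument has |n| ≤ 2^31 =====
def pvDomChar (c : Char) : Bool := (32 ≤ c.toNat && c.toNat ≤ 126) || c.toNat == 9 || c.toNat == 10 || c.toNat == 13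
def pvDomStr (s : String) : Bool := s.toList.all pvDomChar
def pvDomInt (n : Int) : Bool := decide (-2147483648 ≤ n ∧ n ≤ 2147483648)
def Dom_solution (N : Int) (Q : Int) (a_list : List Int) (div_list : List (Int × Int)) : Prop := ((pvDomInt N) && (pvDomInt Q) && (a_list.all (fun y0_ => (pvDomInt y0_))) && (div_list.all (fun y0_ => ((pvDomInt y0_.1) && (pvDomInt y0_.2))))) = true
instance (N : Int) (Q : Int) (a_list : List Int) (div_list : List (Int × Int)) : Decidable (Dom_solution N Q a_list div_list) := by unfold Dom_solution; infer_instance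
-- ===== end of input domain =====

-- B replaces the prefix-of-squares table and the squaring-plus-//2 query formula by a
-- single-pass table D[k] = D[k-1] + a_k * pfs[k-1], answering each query as a direct
-- integer difference (objective: alternative decomposition, no squaring, no division).

-- ===== PORT A =====
-- pfs = [0]; for ai in a_list: pfs.append(pfs[-1] + ai)
def pfsStepA (p : List Int) (ai : Int) : List Int :=
  p ++ [((PySem.List.pyGet? p (-1)).getD 0) + ai]
-- ppfs = [0]; for ai in a_list: ppfs.append(ppfs[-1] + ai ** 2)
def ppfsStepA (p : List Int) (ai : Int) : List Int :=
  p ++ [((PySem.List.pyGet? p (-1)).getD 0) + ai ^ 2]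

def solution (N : Int) (Q : Int) (a_list : List Int) (div_list : List (Int × Int)) : List Int :=
  let pfs := a_list.foldl pfsStepA [0]
  let ppfs := a_list.foldl ppfsStepA [0]
  div_list.foldl (fun answers lr =>
    let l := lr.1
    let r := lr.2
    let interval_sum := ((PySem.List.pyGet? pfs r).getD 0) - ((PySem.List.pyGet? pfs (l - 1)).getD 0)
    let powered_interval_sum := ((PySem.List.pyGet? ppfs r).getD 0) - ((PySem.List.pyGet? ppfs (l - 1)).getD 0)
    let answer := PySem.Int.floordiv (interval_sum ^ 2 - powered_interval_sum) 2
    answers ++ [answer]) []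

-- ===== PORT B =====
-- one loop building (pfs, D); D.append uses the pre-update pfs[-1]
def stepB (pd : List Int × List Int) (ai : Int) : List Int × List Int :=
  let p := pd.1
  let d := pd.2
  (p ++ [((PySem.List.pyGet? p (-1)).getD 0) + ai],
   d ++ [((PySem.List.pyGet? d (-1)).getD 0) + ai * ((PySem.List.pyGet? p (-1)).getD 0)])

def solution_alt (N : Int) (Q : Int) (a_list : List Int) (div_list : List (Int × Int)) : List Int :=
  let pd := a_list.foldl stepB ([0], [0])
  let pfs := pd.1
  let D := pd.2
  div_list.map (fun lr =>
    let l := lr.1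
    let r := lr.2
    (((PySem.List.pyGet? D r).getD 0) - ((PySem.List.pyGet? D (l - 1)).getD 0))
      - ((PySem.List.pyGet? pfs (l - 1)).getD 0)
        * (((PySem.List.pyGet? pfs r).getD 0) - ((PySem.List.pyGet? pfs (l - 1)).getD 0)))

-- ===== PRECONDITION & SPEC =====
-- Pre_ excludes exactly the queries on which the Python A raises IndexError
-- (l-1 or r outside the valid Python index range of the length-(n+1) prefix arrays).
def Pre_solution (N : Int) (Q : Int) (a_list : List Int) (div_list : List (Int × Int)) : Prop :=
  ∀ lr ∈ div_list,
    -((a_list.length : Int) + 1) ≤ lr.1 - 1 ∧ lr.1 - 1 ≤ (a_list.length : Int) ∧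
    -((a_list.length : Int) + 1) ≤ lr.2 ∧ lr.2 ≤ (a_list.length : Int)
instance (N : Int) (Q : Int) (a_list : List Int) (div_list : List (Int × Int)) : Decidable (Pre_solution N Q a_list div_list) := by unfold Pre_solution; infer_instance

def pvWitness_solution : Int × Int × List Int × (List (Int × Int)) := (3, 2, [1, 2, 3], [(1, 3), (2, 3)])

def Spec_solution (N : Int) (Q : Int) (a_list : List Int) (div_list : List (Int × Int)) (out : List Int) : Prop := out = solution_alt N Q a_list div_list
instance (N : Int) (Q : Int) (a_list : List Int) (div_list : List (Int × Int)) (out : List Int) : Decidable (Spec_solution N Q a_list div_list out) := by unfold Spec_solution; infer_instance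

-- ===== CLAIM (what is proved, stated in full; the proofs are below) =====
def Claim_equal_solution : Prop := ∀ (N : Int) (Q : Int) (a_list : List Int) (div_list : List (Int × Int)), Dom_solution N Q a_list div_list → Pre_solution N Q a_list div_list → Spec_solution N Q a_list div_list (solution N Q a_list div_list)

-- ===== LEMMAS AND PROOFS =====

-- abstract prefix tables (proof-side only)
def pfsL (s : Int) : List Int → List Int
  | [] => [s]
  | a :: xs => s :: pfsL (s + a) xs

def ppfsL (q : Int) : List Int → List Int
  | [] => [q]
  | a :: xs => q :: ppfsL (q + a ^ 2) xs

def dL (s d : Int) : List Int → List Int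
  | [] => [d]
  | a :: xs => d :: dL (s + a) (d + a * s) xs

theorem pfsL_length (s : Int) (xs : List Int) : (pfsL s xs).length = xs.length + 1 := by
  induction xs generalizing s with
  | nil => rfl
  | cons a xs ih => simp [pfsL, ih]

theorem ppfsL_length (q : Int) (xs : List Int) : (ppfsL q xs).length = xs.length + 1 := by
  induction xs generalizing q with
  | nil => rfl
  | cons a xs ih => simp [ppfsL, ih]

theorem dL_length (s d : Int) (xs : List Int) : (dL s d xs).length = xs.length + 1 := by
  induction xs generalizing s d with
  | nil => rfl
  | cons a xs ih => simp [dL, ih]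

theorem foldl_pfsStepA (xs : List Int) : ∀ (ys : List Int) (s : Int),
    xs.foldl pfsStepA (ys ++ [s]) = ys ++ pfsL s xs := by
  induction xs with
  | nil => intro ys s; simp [pfsL]
  | cons a xs ih =>
    intro ys s
    have h1 : pfsStepA (ys ++ [s]) a = (ys ++ [s]) ++ [s + a] := by
      simp [pfsStepA, PySem.List.pyGet?_neg_one_append_singleton]
    simp only [List.foldl_cons, h1]
    rw [ih (ys ++ [s]) (s + a)]
    simp [pfsL]

theorem foldl_ppfsStepA (xs : List Int) : ∀ (ys : List Int) (q : Int),
    xs.foldl ppfsStepA (ys ++ [q]) = ys ++ ppfsL q xs := by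
  induction xs with
  | nil => intro ys q; simp [ppfsL]
  | cons a xs ih =>
    intro ys q
    have h1 : ppfsStepA (ys ++ [q]) a = (ys ++ [q]) ++ [q + a ^ 2] := by
      simp [ppfsStepA, PySem.List.pyGet?_neg_one_append_singleton]
    simp only [List.foldl_cons, h1]
    rw [ih (ys ++ [q]) (q + a ^ 2)]
    simp [ppfsL]

theorem foldl_stepB (xs : List Int) : ∀ (ys zs : List Int) (s d : Int),
    xs.foldl stepB (ys ++ [s], zs ++ [d]) = (ys ++ pfsL s xs, zs ++ dL s d xs) := by
  induction xs with
  | nil => intro ys zs s d; simp [pfsL, dL]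
  | cons a xs ih =>
    intro ys zs s d
    have h1 : stepB (ys ++ [s], zs ++ [d]) a
        = ((ys ++ [s]) ++ [s + a], (zs ++ [d]) ++ [d + a * s]) := by
      simp [stepB, PySem.List.pyGet?_neg_one_append_singleton]
    simp only [List.foldl_cons, h1]
    rw [ih (ys ++ [s]) (zs ++ [d]) (s + a) (d + a * s)]
    simp [pfsL, dL]

-- the invariant: pfs[k]^2 - ppfs[k] = 2 * D[k] at every position
theorem key_invariant (xs : List Int) : ∀ (s q d : Int) (k : Nat),
    s ^ 2 - q = 2 * d →
    ((pfsL s xs).getD k 0) ^ 2 - (ppfsL q xs).getD k 0 = 2 * ((dL s d xs).getD k 0) := by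
  induction xs with
  | nil =>
    intro s q d k h
    cases k with
    | zero => simpa [pfsL, ppfsL, dL] using h
    | succ k => simp [pfsL, ppfsL, dL]
  | cons a xs ih =>
    intro s q d k h
    cases k with
    | zero => simpa [pfsL, ppfsL, dL] using h
    | succ k =>
      simp only [pfsL, ppfsL, dL, List.getD_cons_succ]
      exact ih (s + a) (q + a ^ 2) (d + a * s) k (by ring_nf; ring_nf at h; omega)

-- a valid Python index read as a getD at the resolved natural position
theorem pyGet_getD_resolve (xs : List Int) (m : Int) (k : Nat)
    (h1 : -(xs.length : Int) ≤ m) (h2 : m ≤ (xs.length : Int) - 1)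
    (hk : (k : Int) = if m < 0 then m + (xs.length : Int) else m) :
    ((PySem.List.pyGet? xs m).getD 0) = xs.getD k 0 := by
  rw [List.getD_eq_getElem?_getD]
  by_cases hm : m < 0
  · rw [if_pos hm] at hk
    have hp1 : 0 < (xs.length - k) := by omega
    have hp2 : (xs.length - k) ≤ xs.length := by omega
    have hme : m = -(((xs.length - k : Nat) : Int)) := by omega
    have hke : xs.length - (xs.length - k) = k := by omega
    rw [hme, PySem.List.pyGet?_neg_natCast _ _ hp1 hp2, hke]
  · rw [if_neg hm] at hk
    have hme : m = ((k : Int)) := by omega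
    rw [hme, PySem.List.pyGet?_natCast]

-- per-query equality, with both sides already expressed over the abstract tables
theorem query_eq (a_list : List Int) (l r : Int)
    (hpre : -((a_list.length : Int) + 1) ≤ l - 1 ∧ l - 1 ≤ (a_list.length : Int) ∧
            -((a_list.length : Int) + 1) ≤ r ∧ r ≤ (a_list.length : Int)) :
    PySem.Int.floordiv
      ((((PySem.List.pyGet? (pfsL 0 a_list) r).getD 0) - ((PySem.List.pyGet? (pfsL 0 a_list) (l - 1)).getD 0)) ^ 2
        - (((PySem.List.pyGet? (ppfsL 0 a_list) r).getD 0) - ((PySem.List.pyGet? (ppfsL 0 a_list) (l - 1)).getD 0))) 2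
    = (((PySem.List.pyGet? (dL 0 0 a_list) r).getD 0) - ((PySem.List.pyGet? (dL 0 0 a_list) (l - 1)).getD 0))
      - ((PySem.List.pyGet? (pfsL 0 a_list) (l - 1)).getD 0)
        * (((PySem.List.pyGet? (pfsL 0 a_list) r).getD 0) - ((PySem.List.pyGet? (pfsL 0 a_list) (l - 1)).getD 0)) := by
  obtain ⟨h1, h2, h3, h4⟩ := hpre
  have hlp := pfsL_length 0 a_list
  have hlq := ppfsL_length 0 a_list
  have hld := dL_length (0 : Int) 0 a_list
  obtain ⟨i, hi⟩ : ∃ i : Nat, (i : Int) = if l - 1 < 0 then l - 1 + ((a_list.length : Int) + 1) else l - 1 :=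
    ⟨(if l - 1 < 0 then l - 1 + ((a_list.length : Int) + 1) else l - 1).toNat, by split_ifs <;> omega⟩
  obtain ⟨j, hj⟩ : ∃ j : Nat, (j : Int) = if r < 0 then r + ((a_list.length : Int) + 1) else r :=
    ⟨(if r < 0 then r + ((a_list.length : Int) + 1) else r).toNat, by split_ifs <;> omega⟩
  rw [pyGet_getD_resolve (pfsL 0 a_list) r j (by omega) (by omega) (by rw [hlp]; push_cast; exact hj),
      pyGet_getD_resolve (pfsL 0 a_list) (l - 1) i (by omega) (by omega) (by rw [hlp]; push_cast; exact hi),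
      pyGet_getD_resolve (ppfsL 0 a_list) r j (by omega) (by omega) (by rw [hlq]; push_cast; exact hj),
      pyGet_getD_resolve (ppfsL 0 a_list) (l - 1) i (by omega) (by omega) (by rw [hlq]; push_cast; exact hi),
      pyGet_getD_resolve (dL 0 0 a_list) r j (by omega) (by omega) (by rw [hld]; push_cast; exact hj),
      pyGet_getD_resolve (dL 0 0 a_list) (l - 1) i (by omega) (by omega) (by rw [hld]; push_cast; exact hi)]
  have ki := key_invariant a_list 0 0 0 i (by ring)
  have kj := key_invariant a_list 0 0 0 j (by ring)
  set pi := (pfsL 0 a_list).getD i 0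
  set pj := (pfsL 0 a_list).getD j 0
  set qi := (ppfsL 0 a_list).getD i 0
  set qj := (ppfsL 0 a_list).getD j 0
  set di := (dL 0 0 a_list).getD i 0
  set dj := (dL 0 0 a_list).getD j 0
  have hnum : (pj - pi) ^ 2 - (qj - qi) = 2 * ((dj - di) - pi * (pj - pi)) := by nlinarith [ki, kj]
  rw [hnum]
  exact (PySem.Int.floordiv_eq_iff_of_pos (by omega)).mpr (by constructor <;> nlinarith)

-- ===== VERDICT (by name: the statement is the Claim_ definition above) =====
theorem solution_spec : Claim_equal_solution := by
  intro N Q a_list div_list _ hpre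
  unfold Spec_solution solution solution_alt
  have hA : a_list.foldl pfsStepA [0] = pfsL 0 a_list := foldl_pfsStepA a_list [] 0
  have hA2 : a_list.foldl ppfsStepA [0] = ppfsL 0 a_list := foldl_ppfsStepA a_list [] 0
  have hB : a_list.foldl stepB ([0], [0]) = (pfsL 0 a_list, dL 0 0 a_list) :=
    foldl_stepB a_list [] [] 0 0
  simp only [hA, hA2, hB]
  rw [PySem.List.foldl_append_singleton_eq_map]
  simp only [List.nil_append]
  apply List.map_congr_left
  intro lr hmem
  exact query_eq a_list lr.1 lr.2 (hpre lr hmem)
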